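-- pv_equiv track=rewrite | github.com/easyjpgtopdf/DocTools | h1_keyword_search_volume_analysis.py | extract_main_keyword
-- ===== SOURCE A (Python) =====
-- KEYWORD_VOLUMES = {
--     # PDF Tools - High Volume
--     "pdf converter": 450000,
--     "jpg to pdf": 165000,
--     "word to pdf": 135000,
--     "pdf to word": 110000,
--     "merge pdf": 90000,
--     "split pdf": 74000,
--     "compress pdf": 60500,
--     "edit pdf": 49500,
--     "pdf to jpg": 49500,
--     "pdf to excel": 40500,
--     "excel to pdf": 33100,
--     "pdf to ppt": 27100,
--     "ppt to pdf": 22200,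
--     "protect pdf": 18100,
--     "unlock pdf": 14800,
--     "watermark pdf": 12100,
--     "crop pdf": 9900,
--     "add page numbers pdf": 8100,
--
--     # Image Tools
--     "remove background": 135000,
--     "image converter": 49500,
--     "resize image": 33100,
--     "compress image": 27100,
--     "image editor": 22200,
--     "image repair": 18100,
--     "watermark image": 14800,
--     "ocr image": 12100,
--     "image to text": 9900,
--
--     # Resume/CV Tools
--     "resume maker": 110000,
--     "resume builder": 90500,
--     "cv maker": 49500,
--     "online resume": 33100,
--     "resume generator": 27100,
--     "biodata maker": 14800,
--
--     # Archive Tools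
--     "zip converter": 18100,
--     "rar extractor": 12100,
--     "7z extractor": 8100,
--
--     # Other Tools
--     "ai image generator": 22200,
--     "background remover": 135000,
-- }
--
-- def extract_main_keyword(h1_text):
--     """Extract main keyword from H1 text."""
--     if not h1_text or h1_text == "NO H1 TAG":
--         return None
--
--     # Common patterns to extract keywords
--     h1_lower = h1_text.lower()
--
--     # Check for high-volume keywords
--     for keyword, volume in sorted(KEYWORD_VOLUMES.items(), key=lambda x: x[1], reverse=True):
--         if keyword in h1_lower:
--             return keyword
--
--     # Extract first meaningful words
--     words = h1_text.split()
--     if len(words) >= 2: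
--         # Take first 2-3 words as keyword
--         keyword = " ".join(words[:3]).lower()
--         # Remove common words
--         stop_words = ['online', 'free', 'tool', 'convert', 'converter', 'the', 'a', 'an']
--         keyword_parts = [w for w in keyword.split() if w not in stop_words]
--         if keyword_parts:
--             return " ".join(keyword_parts[:3])
--
--     return h1_text.lower()[:50]
-- ===== SOURCE B (Python) =====
-- KEYWORD_VOLUMES = {
--     # PDF Tools - High Volume
--     "pdf converter": 450000,
--     "jpg to pdf": 165000,
--     "word to pdf": 135000,
--     "pdf to word": 110000,
--     "merge pdf": 90000,
--     "split pdf": 74000,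
--     "compress pdf": 60500,
--     "edit pdf": 49500,
--     "pdf to jpg": 49500,
--     "pdf to excel": 40500,
--     "excel to pdf": 33100,
--     "pdf to ppt": 27100,
--     "ppt to pdf": 22200,
--     "protect pdf": 18100,
--     "unlock pdf": 14800,
--     "watermark pdf": 12100,
--     "crop pdf": 9900,
--     "add page numbers pdf": 8100,
--
--     # Image Tools
--     "remove background": 135000,
--     "image converter": 49500,
--     "resize image": 33100,
--     "compress image": 27100,
--     "image editor": 22200,
--     "image repair": 18100,
--     "watermark image": 14800,
--     "ocr image": 12100,
--     "image to text": 9900,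
--
--     # Resume/CV Tools
--     "resume maker": 110000,
--     "resume builder": 90500,
--     "cv maker": 49500,
--     "online resume": 33100,
--     "resume generator": 27100,
--     "biodata maker": 14800,
--
--     # Archive Tools
--     "zip converter": 18100,
--     "rar extractor": 12100,
--     "7z extractor": 8100,
--
--     # Other Tools
--     "ai image generator": 22200,
--     "background remover": 135000,
-- }
--
-- def extract_main_keyword(h1_text):
--     """Extract main keyword from H1 text."""
--     if not h1_text or h1_text == "NO H1 TAG":
--         return None
--
--     low = h1_text.lower()
--
--     # Single pass over the table in insertion order: keep the highest-volume
--     # keyword occurring in the H1 (strict '<' keeps the first maximal one,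
--     # matching the stable descending sort's tie-break).
--     best, best_vol = None, 0
--     for kw, vol in KEYWORD_VOLUMES.items():
--         if kw in low and best_vol < vol:
--             best, best_vol = kw, vol
--     if best is not None:
--         return best
--
--     # Word-extraction fallback, done on the lowered string in one staging:
--     # ASCII lowering never touches whitespace, so splitting the lowered text
--     # equals lowering each word of the original split.
--     words = low.split()
--     if len(words) >= 2:
--         stop_words = ['online', 'free', 'tool', 'convert', 'converter', 'the', 'a', 'an']
--         parts = [w for w in words[:3] if w not in stop_words]
--         if parts:
--             return " ".join(parts)
--
--     return low[:50]
-- ===== Notes on version B (the rewrite author's own statement) =====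
-- stated objective: alternative
-- what changed: Phase 1 replaces sort-descending-then-return-first-substring-hit by a single insertion-order pass keeping the highest-volume matching keyword (strict '<' keeps the first maximal one, matching the stable sort's tie-break), and the word-extraction fallback works directly on the lowered string (split once, take 3, filter) instead of A's split/join/lower/re-split staging.
import Mathlib
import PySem

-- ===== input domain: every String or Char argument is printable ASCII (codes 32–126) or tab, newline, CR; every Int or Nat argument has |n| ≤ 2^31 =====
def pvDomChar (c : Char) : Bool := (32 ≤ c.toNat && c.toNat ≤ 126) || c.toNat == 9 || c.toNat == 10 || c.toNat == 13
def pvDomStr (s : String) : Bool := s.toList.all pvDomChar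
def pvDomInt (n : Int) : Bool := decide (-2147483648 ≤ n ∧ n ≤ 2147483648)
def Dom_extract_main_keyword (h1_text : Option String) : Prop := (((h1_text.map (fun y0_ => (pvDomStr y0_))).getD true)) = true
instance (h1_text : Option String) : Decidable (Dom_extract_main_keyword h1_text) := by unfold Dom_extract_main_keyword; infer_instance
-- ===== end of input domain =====

-- B replaces A's sort-descending-then-first-substring-hit phase by a single insertion-order pass
-- keeping the highest-volume matching keyword (strict '<' keeps the first maximal one, matching
-- the stable sort's tie-break), and does the word fallback on the lowered string in one staging
-- instead of A's split/join/lower/re-split. Objective: alternative decomposition, same cost class.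

-- KEYWORD_VOLUMES as an association list in insertion order (keys are distinct)
def kwItems : List (String × Int) := [
  ("pdf converter", 450000),
  ("jpg to pdf", 165000),
  ("word to pdf", 135000),
  ("pdf to word", 110000),
  ("merge pdf", 90000),
  ("split pdf", 74000),
  ("compress pdf", 60500),
  ("edit pdf", 49500),
  ("pdf to jpg", 49500),
  ("pdf to excel", 40500),
  ("excel to pdf", 33100),
  ("pdf to ppt", 27100),
  ("ppt to pdf", 22200),
  ("protect pdf", 18100),
  ("unlock pdf", 14800),
  ("watermark pdf", 12100),
  ("crop pdf", 9900),
  ("add page numbers pdf", 8100),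
  ("remove background", 135000),
  ("image converter", 49500),
  ("resize image", 33100),
  ("compress image", 27100),
  ("image editor", 22200),
  ("image repair", 18100),
  ("watermark image", 14800),
  ("ocr image", 12100),
  ("image to text", 9900),
  ("resume maker", 110000),
  ("resume builder", 90500),
  ("cv maker", 49500),
  ("online resume", 33100),
  ("resume generator", 27100),
  ("biodata maker", 14800),
  ("zip converter", 18100),
  ("rar extractor", 12100),
  ("7z extractor", 8100),
  ("ai image generator", 22200),
  ("background remover", 135000)]

-- ===== PORT A =====
-- A's loop: for keyword, volume in sorted(items, key=volume, reverse=True): if keyword in h1_lower: return keyword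
def findKwA : List (String × Int) → String → Option String
  | [], _ => none
  | (k, _v) :: rest, hl => if PySem.Str.isIn k hl then some k else findKwA rest hl

-- A's "Extract first meaningful words" block plus the final return
def fallbackA (s : String) : Option String :=
  let words := PySem.Str.split₀ s
  if 2 ≤ words.length then
    let keyword := PySem.Str.lower (PySem.Str.join " " (words.take 3))
    let stop_words : List String := ["online", "free", "tool", "convert", "converter", "the", "a", "an"]
    let keyword_parts := (PySem.Str.split₀ keyword).filter (fun w => !stop_words.contains w)
    if keyword_parts ≠ [] then
      some (PySem.Str.join " " (keyword_parts.take 3))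
    else
      some (PySem.Str.slice (PySem.Str.lower s) none (some 50))
  else
    some (PySem.Str.slice (PySem.Str.lower s) none (some 50))

def extract_main_keyword (h1_text : Option String) : Option String :=
  match h1_text with
  | none => none
  | some s =>
    if s = "" ∨ s = "NO H1 TAG" then none
    else
      let h1_lower := PySem.Str.lower s
      match findKwA (PySem.List.sorted kwItems (fun kv => kv.2) true) h1_lower with
      | some k => some k
      | none => fallbackA s

-- ===== PORT B =====
def extract_main_keyword_alt (h1_text : Option String) : Option String :=
  match h1_text with
  | none => none
  | some s =>
    if s = "" ∨ s = "NO H1 TAG" then none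
    else
      let low := PySem.Str.lower s
      -- single pass: best, best_vol = None, 0; for kw, vol in items: if kw in low and best_vol < vol: ...
      let best := kwItems.foldl
        (fun (acc : Option String × Int) kv =>
          if PySem.Str.isIn kv.1 low && decide (acc.2 < kv.2) then (some kv.1, kv.2) else acc)
        (none, 0)
      match best.1 with
      | some k => some k
      | none =>
        let words := PySem.Str.split₀ low
        if 2 ≤ words.length then
          let stop_words : List String := ["online", "free", "tool", "convert", "converter", "the", "a", "an"]
          let parts := (words.take 3).filter (fun w => !stop_words.contains w)
          if parts ≠ [] then some (PySem.Str.join " " parts)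
          else some (PySem.Str.slice low none (some 50))
        else some (PySem.Str.slice low none (some 50))

-- ===== PRECONDITION & SPEC =====
def Spec_extract_main_keyword (h1_text : Option String) (out : Option String) : Prop := out = extract_main_keyword_alt h1_text
instance (h1_text : Option String) (out : Option String) : Decidable (Spec_extract_main_keyword h1_text out) := by unfold Spec_extract_main_keyword; infer_instance

-- ===== CLAIM (what is proved, stated in full; the proofs are below) =====
def Claim_equal_extract_main_keyword : Prop := ∀ (h1_text : Option String), Dom_extract_main_keyword h1_text → Spec_extract_main_keyword h1_text (extract_main_keyword h1_text)

-- ===== LEMMAS AND PROOFS =====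

-- ---------- phase 1: A's find-in-descending-sort = first maximal matching keyword ----------

-- the foldl step of PySem.List.max?
def mstep {α : Type} (key : α → Int) (acc : Option α) (x : α) : Option α :=
  match acc with
  | none => some x
  | some m => if key m < key x then some x else some m

theorem max?_eq_foldl_mstep {α : Type} (key : α → Int) (xs : List α) :
    PySem.List.max? xs key = xs.foldl (mstep key) none := rfl

theorem foldl_mstep_of_le {α : Type} (key : α → Int) (m : α) (r : List α)
    (h : ∀ y ∈ r, key y ≤ key m) : r.foldl (mstep key) (some m) = some m := by
  induction r with
  | nil => rfl
  | cons y t ih =>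
    have hy : key y ≤ key m := h y (List.mem_cons_self)
    have : mstep key (some m) y = some m := by
      simp [mstep]; omega
    simpa [List.foldl_cons, this] using ih (fun z hz => h z (List.mem_cons_of_mem _ hz))

theorem foldl_mstep_some_mem {α : Type} (key : α → Int) :
    ∀ (t : List α) (x b : α), t.foldl (mstep key) (some x) = some b → b = x ∨ b ∈ t := by
  intro t
  induction t with
  | nil => intro x b h; simp at h; exact Or.inl h.symm
  | cons y t ih =>
    intro x b h
    simp only [List.foldl_cons] at h
    by_cases hc : key x < key y
    · have := ih y b (by simpa [mstep, hc] using h)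
      rcases this with h1 | h1
      · exact Or.inr (h1 ▸ List.mem_cons_self)
      · exact Or.inr (List.mem_cons_of_mem _ h1)
    · have := ih x b (by simpa [mstep, hc] using h)
      rcases this with h1 | h1
      · exact Or.inl h1
      · exact Or.inr (List.mem_cons_of_mem _ h1)

theorem max?_of_decomp {α : Type} (key : α → Int) (l r : List α) (m : α)
    (hl : ∀ y ∈ l, key y < key m) (hr : ∀ y ∈ r, key y ≤ key m) :
    PySem.List.max? (l ++ m :: r) key = some m := by
  rw [max?_eq_foldl_mstep, List.foldl_append]
  cases hs : l.foldl (mstep key) none with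
  | none =>
    simp only [List.foldl_cons, mstep]
    exact foldl_mstep_of_le key m r hr
  | some b =>
    have hb : b ∈ l := by
      cases l with
      | nil => simp at hs
      | cons a t =>
        simp only [List.foldl_cons, mstep] at hs
        rcases foldl_mstep_some_mem key t a b hs with h1 | h1
        · exact h1 ▸ List.mem_cons_self
        · exact List.mem_cons_of_mem _ h1
    have hbm : key b < key m := hl b hb
    have : mstep key (some b) m = some m := by simp [mstep, hbm]
    simp only [List.foldl_cons, this]
    exact foldl_mstep_of_le key m r hr

theorem max?_decomp {α : Type} (key : α → Int) :
    ∀ (t : List α) (x m : α), t.foldl (mstep key) (some x) = some m →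
    ∃ l r, x :: t = l ++ m :: r ∧ (∀ y ∈ l, key y < key m) ∧ (∀ y ∈ r, key y ≤ key m) := by
  intro t
  induction t with
  | nil =>
    intro x m h
    simp at h
    exact ⟨[], [], by simp [h], by simp, by simp⟩
  | cons y t ih =>
    intro x m h
    simp only [List.foldl_cons] at h
    by_cases hc : key x < key y
    · obtain ⟨l, r, hdec, hlt, hle⟩ := ih y m (by simpa [mstep, hc] using h)
      cases l with
      | nil =>
        rw [List.nil_append] at hdec
        injection hdec with h1 h2
        subst h1; subst h2
        refine ⟨[x], t, rfl, ?_, hle⟩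
        intro z hz; simp at hz; subst hz; exact hc
      | cons a l0 =>
        rw [List.cons_append] at hdec
        injection hdec with h1 h2
        subst h1
        have hym : key y < key m := hlt y List.mem_cons_self
        refine ⟨x :: y :: l0, r, by simp [h2], ?_, hle⟩
        intro z hz
        rcases List.mem_cons.mp hz with h3 | h3
        · subst h3; exact lt_trans hc hym
        · exact hlt z h3
    · obtain ⟨l, r, hdec, hlt, hle⟩ := ih x m (by simpa [mstep, hc] using h)
      cases l with
      | nil =>
        rw [List.nil_append] at hdec
        injection hdec with h1 h2
        subst h1; subst h2
        refine ⟨[], y :: t, rfl, by simp, ?_⟩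
        intro z hz
        rcases List.mem_cons.mp hz with h3 | h3
        · subst h3; omega
        · exact hle z h3
      | cons a l0 =>
        rw [List.cons_append] at hdec
        injection hdec with h1 h2
        subst h1
        have hxm : key x < key m := hlt x List.mem_cons_self
        refine ⟨x :: y :: l0, r, by simp [h2], ?_, hle⟩
        intro z hz
        rcases List.mem_cons.mp hz with h3 | h3
        · subst h3; exact hxm
        · rcases List.mem_cons.mp h3 with h4 | h4
          · subst h4; omega
          · exact hlt z (List.mem_cons_of_mem _ h4)

theorem max?_some_decomp {α : Type} (key : α → Int) (xs : List α) (m : α)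
    (h : PySem.List.max? xs key = some m) :
    ∃ l r, xs = l ++ m :: r ∧ (∀ y ∈ l, key y < key m) ∧ (∀ y ∈ r, key y ≤ key m) := by
  cases xs with
  | nil => simp [max?_eq_foldl_mstep] at h
  | cons x t =>
    rw [max?_eq_foldl_mstep] at h
    simp only [List.foldl_cons, mstep] at h
    exact max?_decomp key t x m h

theorem max?_filter_of_max {α : Type} (key : α → Int) (p : α → Bool) (xs : List α) (m : α)
    (h : PySem.List.max? xs key = some m) (hp : p m = true) :
    PySem.List.max? (xs.filter p) key = some m := by
  obtain ⟨l, r, hdec, hlt, hle⟩ := max?_some_decomp key xs m h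
  subst hdec
  rw [List.filter_append, List.filter_cons_of_pos hp]
  exact max?_of_decomp key _ _ m
    (fun y hy => hlt y (List.mem_filter.mp hy).1)
    (fun y hy => hle y (List.mem_filter.mp hy).1)

theorem filter_erase_of_neg {α : Type} [DecidableEq α] (p : α → Bool) (m : α) (hp : p m = false) :
    ∀ xs : List α, (xs.erase m).filter p = xs.filter p := by
  intro xs
  induction xs with
  | nil => rfl
  | cons x t ih =>
    by_cases hx : x = m
    · subst hx
      rw [List.erase_cons_head, List.filter_cons_of_neg (by simp [hp])]
    · rw [List.erase_cons_tail (by simpa using hx), List.filter_cons, List.filter_cons, ih]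

-- stable descending selection sort (with fuel): repeatedly pop the FIRST maximal element
def firstMaxSort {α : Type} [DecidableEq α] (key : α → Int) : Nat → List α → List α
  | 0, _ => []
  | n + 1, xs =>
    match PySem.List.max? xs key with
    | none => []
    | some m => m :: firstMaxSort key n (xs.erase m)

theorem find?_firstMaxSort {α : Type} [DecidableEq α] (key : α → Int) (p : α → Bool) :
    ∀ (n : Nat) (xs : List α), xs.length ≤ n →
    (firstMaxSort key n xs).find? p = PySem.List.max? (xs.filter p) key := by
  intro n
  induction n with
  | zero =>
    intro xs hn
    cases xs with
    | nil => rfl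
    | cons x t => simp at hn
  | succ n ih =>
    intro xs hn
    unfold firstMaxSort
    cases hm : PySem.List.max? xs key with
    | none =>
      have : xs = [] := (PySem.List.max?_eq_none_iff xs key).mp hm
      subst this
      rfl
    | some m =>
      have hmem : m ∈ xs := PySem.List.max?_mem hm
      by_cases hp : p m = true
      · rw [List.find?_cons_of_pos hp, (max?_filter_of_max key p xs m hm hp)]
      · have hp' : p m = false := by simpa using hp
        rw [List.find?_cons_of_neg (by simp [hp'])]
        have hlen : (xs.erase m).length ≤ n := by
          have h0 : 0 < xs.length := List.length_pos_of_mem hmem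
          rw [List.length_erase_of_mem hmem]; omega
        rw [ih (xs.erase m) hlen, filter_erase_of_neg p m hp' xs]

theorem sorted_kw_eq_firstMaxSort :
    PySem.List.sorted kwItems (fun kv => kv.2) true = firstMaxSort (fun kv => kv.2) kwItems.length kwItems := by
  decide

theorem findKwA_eq (l : List (String × Int)) (hl : String) :
    findKwA l hl = (l.find? (fun kv => PySem.Str.isIn kv.1 hl)).map (fun kv => kv.1) := by
  induction l with
  | nil => rfl
  | cons kv t ih =>
    obtain ⟨k, v⟩ := kv
    cases h : PySem.Chars.isIn k.toList hl.toList <;>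
      simp [findKwA, h, ih]

-- ---------- phase 1: B's running strict argmax = first maximal matching keyword ----------

-- B's update once the membership test has passed
def bupd (acc : Option String × Int) (kv : String × Int) : Option String × Int :=
  if acc.2 < kv.2 then (some kv.1, kv.2) else acc

theorem foldl_bupd_some (m : List (String × Int)) :
    ∀ (k : String) (v : Int), ∃ kv', m.foldl (mstep (fun kv => kv.2)) (some (k, v)) = some kv' ∧
      m.foldl bupd (some k, v) = (some kv'.1, kv'.2) := by
  induction m with
  | nil => intro k v; exact ⟨(k, v), rfl, rfl⟩
  | cons x t ih =>
    intro k v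
    by_cases hc : v < x.2
    · obtain ⟨kv', h1, h2⟩ := ih x.1 x.2
      exact ⟨kv', by simpa [mstep, hc] using h1, by simpa [bupd, hc] using h2⟩
    · obtain ⟨kv', h1, h2⟩ := ih k v
      exact ⟨kv', by simpa [mstep, hc] using h1, by simpa [bupd, hc] using h2⟩

theorem foldl_bupd_eq_max? (m : List (String × Int)) (hpos : ∀ kv ∈ m, 0 < kv.2) :
    (m.foldl bupd (none, 0)).1 = (PySem.List.max? m (fun kv => kv.2)).map (fun kv => kv.1) := by
  cases m with
  | nil => rfl
  | cons x t =>
    have hx : (0 : Int) < x.2 := hpos x List.mem_cons_self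
    have hstep : bupd (none, 0) x = (some x.1, x.2) := by simp [bupd, hx]
    obtain ⟨kv', h1, h2⟩ := foldl_bupd_some t x.1 x.2
    rw [List.foldl_cons, hstep, h2, max?_eq_foldl_mstep, List.foldl_cons]
    have : mstep (fun kv => kv.2) none x = some (x.1, x.2) := rfl
    rw [this, h1]
    rfl

-- B's fused step (membership && strict improvement) is the bupd update under a membership filter
theorem bfold_eq_filter (low : String) (init : Option String × Int) (l : List (String × Int)) :
    l.foldl (fun (acc : Option String × Int) kv =>
        if PySem.Str.isIn kv.1 low && decide (acc.2 < kv.2) then (some kv.1, kv.2) else acc) init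
      = (l.filter (fun kv => PySem.Str.isIn kv.1 low)).foldl bupd init := by
  rw [← PySem.List.foldl_if_eq_foldl_filter (fun kv => PySem.Str.isIn kv.1 low) bupd]
  apply PySem.List.foldl_congr_mem
  intro acc kv _
  cases h : PySem.Str.isIn kv.1 low <;> by_cases hc : acc.2 < kv.2 <;> simp [bupd, hc]

-- ---------- phase 2: the two stagings of the word fallback agree ----------

theorem go_nil (cur : List Char) (acc : List (List Char)) :
    PySem.Chars.split₀.go [] cur acc = if cur.isEmpty then acc.reverse else (cur.reverse :: acc).reverse := rfl
theorem go_cons (c : Char) (rest cur : List Char) (acc : List (List Char)) :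
    PySem.Chars.split₀.go (c :: rest) cur acc =
      if PySem.Chars.isspace c then
        (if cur.isEmpty then PySem.Chars.split₀.go rest [] acc
         else PySem.Chars.split₀.go rest [] (cur.reverse :: acc))
      else PySem.Chars.split₀.go rest (c :: cur) acc := rfl
theorem isspace_lowerChar (c : Char) :
    PySem.Chars.isspace (PySem.Chars.lowerChar c) = PySem.Chars.isspace c := by
  unfold PySem.Chars.lowerChar
  split
  · next h =>
    unfold PySem.Chars.isupper at h
    simp only [Bool.and_eq_true, decide_eq_true_eq] at h
    have h1 : (65 : Nat) ≤ c.toNat := h.1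
    have h2 : c.toNat ≤ 90 := h.2
    have hlt : c.toNat + 32 < 55296 := by omega
    have hv : (Char.ofNat (c.toNat + 32)).toNat = c.toNat + 32 := by
      simp [Char.ofNat, Nat.isValidChar, hlt]
    have e1 : PySem.Chars.isspace c = false := by
      simp [PySem.Chars.isspace]; omega
    have e2 : PySem.Chars.isspace (Char.ofNat (c.toNat + 32)) = false := by
      simp [PySem.Chars.isspace, hv]; omega
    rw [e1, e2]
  · rfl
theorem split₀go_lower (s : List Char) :
    ∀ (cur : List Char) (acc : List (List Char)),
      PySem.Chars.split₀.go (s.map PySem.Chars.lowerChar) (cur.map PySem.Chars.lowerChar)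
          (acc.map (List.map PySem.Chars.lowerChar))
        = (PySem.Chars.split₀.go s cur acc).map (List.map PySem.Chars.lowerChar) := by
  induction s with
  | nil =>
    intro cur acc
    rw [List.map_nil, go_nil, go_nil]
    cases cur <;> simp
  | cons c rest ih =>
    intro cur acc
    rw [List.map_cons, go_cons, go_cons, isspace_lowerChar]
    cases hs : PySem.Chars.isspace c with
    | true =>
      cases cur with
      | nil => simpa using ih [] acc
      | cons a cur' =>
        simp only [List.isEmpty_cons, List.map_cons, if_neg (by simp : ¬((false : Bool) = true))]
        have := ih [] ((a :: cur').reverse :: acc)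
        simpa using this
    | false =>
      simp only [Bool.false_eq_true, if_neg (by simp : ¬(False))]
      simpa using ih (c :: cur) acc
theorem split₀go_words_spec (s : List Char) :
    ∀ (cur : List Char) (acc : List (List Char)),
      (∀ c ∈ cur, PySem.Chars.isspace c = false) →
      (∀ w ∈ acc, w ≠ [] ∧ ∀ c ∈ w, PySem.Chars.isspace c = false) →
      ∀ w ∈ PySem.Chars.split₀.go s cur acc, w ≠ [] ∧ ∀ c ∈ w, PySem.Chars.isspace c = false := by
  induction s with
  | nil =>
    intro cur acc hcur hacc
    rw [go_nil]
    cases hc : cur.isEmpty with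
    | true =>
      exact fun w hw => hacc w (List.mem_reverse.mp hw)
    | false =>
      simp only [Bool.false_eq_true, if_neg (by simp : ¬False)]
      intro w hw
      rcases List.mem_cons.mp (List.mem_reverse.mp hw) with h | h
      · subst h
        refine ⟨by simpa [List.isEmpty_iff] using hc, ?_⟩
        intro c hc'
        exact hcur c (List.mem_reverse.mp hc')
      · exact hacc w h
  | cons c rest ih =>
    intro cur acc hcur hacc
    rw [go_cons]
    cases hs : PySem.Chars.isspace c with
    | true =>
      cases hc : cur.isEmpty with
      | true => simpa [hc] using ih [] acc (by simp) hacc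
      | false =>
        simp only [Bool.false_eq_true, if_neg (by simp : ¬False)]
        refine ih [] (cur.reverse :: acc) (by simp) ?_
        intro w hw
        rcases List.mem_cons.mp hw with h | h
        · subst h
          refine ⟨by simpa [List.isEmpty_iff, List.reverse_eq_nil_iff] using hc, ?_⟩
          intro c' hc'
          exact hcur c' (List.mem_reverse.mp hc')
        · exact hacc w h
    | false =>
      simp only [Bool.false_eq_true, if_neg (by simp : ¬False)]
      refine ih (c :: cur) acc ?_ hacc
      intro c' hc'
      rcases List.mem_cons.mp hc' with h | h
      · subst h; exact hs
      · exact hcur c' h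

theorem split₀go_nospace (w : List Char) (hw : ∀ c ∈ w, PySem.Chars.isspace c = false) :
    ∀ (rest cur : List Char) (acc : List (List Char)),
      PySem.Chars.split₀.go (w ++ rest) cur acc = PySem.Chars.split₀.go rest (w.reverse ++ cur) acc := by
  induction w with
  | nil => intro rest cur acc; simp
  | cons c t ih =>
    intro rest cur acc
    have hc : PySem.Chars.isspace c = false := hw c List.mem_cons_self
    rw [List.cons_append, go_cons, hc]
    simp only [Bool.false_eq_true, if_neg (by simp : ¬False)]
    rw [ih (fun c' h => hw c' (List.mem_cons_of_mem _ h)) rest (c :: cur) acc]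
    simp

theorem split₀go_join (ws : List (List Char))
    (hws : ∀ w ∈ ws, w ≠ [] ∧ ∀ c ∈ w, PySem.Chars.isspace c = false) :
    ∀ acc, PySem.Chars.split₀.go (List.intercalate [' '] ws) [] acc = acc.reverse ++ ws := by
  induction ws with
  | nil => intro acc; simp [List.intercalate, go_nil]
  | cons w ws ih =>
    intro acc
    obtain ⟨hne, hnos⟩ := hws w List.mem_cons_self
    cases ws with
    | nil =>
      have h1 : List.intercalate [' '] [w] = w ++ [] := by
        simp [List.intercalate]
      rw [h1, split₀go_nospace w hnos [] [] acc, go_nil]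
      simp [List.isEmpty_iff, hne]
    | cons w' ws' =>
      have hstep : List.intercalate [' '] (w :: w' :: ws') = w ++ ' ' :: List.intercalate [' '] (w' :: ws') := by
        simp [List.intercalate, List.intersperse]
      rw [hstep, split₀go_nospace w hnos _ [] acc, go_cons]
      have hsp : PySem.Chars.isspace ' ' = true := by decide
      rw [hsp, if_pos rfl,
        if_neg (by simp [List.isEmpty_iff, hne] : ¬((w.reverse ++ [] : List Char).isEmpty = true))]
      simp only [List.append_nil, List.reverse_reverse]
      rw [ih (fun v hv => hws v (List.mem_cons_of_mem _ hv)) (w :: acc)]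
      simp
theorem split₀_lower (cs : List Char) :
    PySem.Chars.split₀ (PySem.Chars.lower cs) = (PySem.Chars.split₀ cs).map PySem.Chars.lower := by
  have := split₀go_lower cs [] []
  simpa [PySem.Chars.split₀, PySem.Chars.lower] using this

theorem split₀_words_spec (cs : List Char) :
    ∀ w ∈ PySem.Chars.split₀ cs, w ≠ [] ∧ ∀ c ∈ w, PySem.Chars.isspace c = false := by
  exact split₀go_words_spec cs [] [] (by simp) (by simp)

theorem split₀_join (ws : List (List Char))
    (hws : ∀ w ∈ ws, w ≠ [] ∧ ∀ c ∈ w, PySem.Chars.isspace c = false) :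
    PySem.Chars.split₀ (PySem.Chars.join [' '] ws) = ws := by
  have := split₀go_join ws hws []
  simpa [PySem.Chars.split₀, PySem.Chars.join] using this

theorem map_intersperse (f : Char → Char) (sep : List Char) (l : List (List Char)) :
    List.map (List.map f) (List.intersperse sep l)
      = List.intersperse (List.map f sep) (List.map (List.map f) l) := by
  induction l with
  | nil => rfl
  | cons x t ih =>
    cases t with
    | nil => rfl
    | cons y u => simpa [List.intersperse] using ih

theorem lower_intercalate (ws : List (List Char)) :
    PySem.Chars.lower (List.intercalate [' '] ws)
      = List.intercalate [' '] (ws.map PySem.Chars.lower) := by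
  unfold PySem.Chars.lower
  simp only [List.intercalate, List.map_flatten, map_intersperse]
  rfl

theorem str_lower_ofList (cs : List Char) :
    PySem.Str.lower (String.ofList cs) = String.ofList (PySem.Chars.lower cs) := by
  simp [PySem.Str.lower]

theorem str_split₀_lower (s : String) :
    PySem.Str.split₀ (PySem.Str.lower s) = (PySem.Str.split₀ s).map PySem.Str.lower := by
  simp only [PySem.Str.split₀, PySem.Str.lower, String.toList_ofList, split₀_lower,
    List.map_map]
  apply List.map_congr_left
  intro w _
  simp [str_lower_ofList]
theorem fallback_eq (s : String) :
    (let words := PySem.Str.split₀ (PySem.Str.lower s)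
     if 2 ≤ words.length then
       let stop_words : List String := ["online", "free", "tool", "convert", "converter", "the", "a", "an"]
       let parts := (words.take 3).filter (fun w => !stop_words.contains w)
       if parts ≠ [] then some (PySem.Str.join " " parts)
       else some (PySem.Str.slice (PySem.Str.lower s) none (some 50))
     else some (PySem.Str.slice (PySem.Str.lower s) none (some 50)))
    = fallbackA s := by
  unfold fallbackA
  rw [str_split₀_lower]
  simp only [List.length_map]
  by_cases hlen : 2 ≤ (PySem.Str.split₀ s).length
  · simp only [if_pos hlen]
    have hkey : PySem.Str.split₀ (PySem.Str.lower (PySem.Str.join " " ((PySem.Str.split₀ s).take 3)))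
        = ((PySem.Str.split₀ s).take 3).map PySem.Str.lower := by
      have hW : PySem.Str.split₀ s = (PySem.Chars.split₀ s.toList).map String.ofList := rfl
      have hjoin : (PySem.Str.join " " ((PySem.Str.split₀ s).take 3)).toList
          = PySem.Chars.join [' '] ((PySem.Chars.split₀ s.toList).take 3) := by
        rw [hW, ← List.map_take]
        simp only [PySem.Str.join, String.toList_ofList, List.map_map]
        congr 1
        simp [Function.comp_def]
      have hwords : ∀ w ∈ ((PySem.Chars.split₀ s.toList).take 3).map PySem.Chars.lower,
          w ≠ [] ∧ ∀ c ∈ w, PySem.Chars.isspace c = false := by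
        intro w hw
        obtain ⟨w0, hw0, rfl⟩ := List.mem_map.mp hw
        obtain ⟨hne, hnos⟩ := split₀_words_spec s.toList w0 (List.mem_of_mem_take hw0)
        constructor
        · simpa [PySem.Chars.lower] using hne
        · intro c hc
          obtain ⟨c0, hc0, rfl⟩ := List.mem_map.mp hc
          rw [isspace_lowerChar]
          exact hnos c0 hc0
      have hlow : (PySem.Str.lower (PySem.Str.join " " ((PySem.Str.split₀ s).take 3))).toList
          = PySem.Chars.join [' '] (((PySem.Chars.split₀ s.toList).take 3).map PySem.Chars.lower) := by
        simp only [PySem.Str.lower, String.toList_ofList, hjoin]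
        exact lower_intercalate _
      show (PySem.Chars.split₀
            ((PySem.Str.lower (PySem.Str.join " " ((PySem.Str.split₀ s).take 3))).toList)).map String.ofList
          = ((PySem.Str.split₀ s).take 3).map PySem.Str.lower
      rw [hlow, split₀_join _ hwords, hW, ← List.map_take, List.map_map, List.map_map]
      apply List.map_congr_left
      intro w _
      simp [str_lower_ofList]
    rw [← List.map_take, hkey]
    set parts := (((PySem.Str.split₀ s).take 3).map PySem.Str.lower).filter
      (fun w => !(["online", "free", "tool", "convert", "converter", "the", "a", "an"] : List String).contains w) with hparts
    have hplen : parts.length ≤ 3 := by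
      calc parts.length ≤ (((PySem.Str.split₀ s).take 3).map PySem.Str.lower).length :=
            List.length_filter_le _ _
        _ ≤ 3 := by simp
    rw [List.take_of_length_le hplen]
  · simp [if_neg hlen]

-- the kwItems volumes are all positive (needed for B's 0-seeded running max)
theorem kwItems_pos : ∀ kv ∈ kwItems, (0 : Int) < kv.2 := by decide

-- ===== VERDICT (by name: the statement is the Claim_ definition above) =====
theorem extract_main_keyword_spec : Claim_equal_extract_main_keyword := by
  intro h1_text _
  unfold Spec_extract_main_keyword extract_main_keyword extract_main_keyword_alt
  cases h1_text with
  | none => rfl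
  | some s =>
    by_cases hg : s = "" ∨ s = "NO H1 TAG"
    · simp [hg]
    · simp only [if_neg hg]
      rw [findKwA_eq, sorted_kw_eq_firstMaxSort,
        find?_firstMaxSort (fun kv => kv.2) _ kwItems.length kwItems (le_refl _),
        bfold_eq_filter]
      rw [foldl_bupd_eq_max? _ (fun kv hkv => kwItems_pos kv (List.mem_filter.mp hkv).1),
        ← fallback_eq s]
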